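-- pv_equiv track=rewrite | github.com/pypi-data/pypi-mirror-397 | packages/culturekit/culturekit-0.0.2.tar.gz/culturekit-0.0.2/src/culturekit/cleaning.py | clean_responses
-- ===== SOURCE A (Python) =====
-- def clean_responses(data):
--     """
--     Cleans a list of responses (each a list of strings) and returns the cleaned list along with a count of invalid entries.
--     """
--     cleaned_responses = []
--     invalid_count = 0
--     for item in data:
--         valid = True
--         cleaned_item = []
--         for i, string in enumerate(item):
--             cleaned = "".join(e.lower() for e in string if e.isalnum())
--             if not cleaned:
--                 valid = False
--                 break
--             if i in [0, 1]:  # first two should be 'a' or 'b'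
--                 if cleaned not in ["a", "b"]:
--                     valid = False
--                     break
--             elif i in [2, 3]:  # middle ones should be nonempty
--                 if len(cleaned) == 0:
--                     valid = False
--                     break
--             elif i in [4, 5]:  # last ones should start with yes/no
--                 if not (cleaned.startswith("yes") or cleaned.startswith("no")):
--                     valid = False
--                     break
--             cleaned_item.append(cleaned)
--         if valid:
--             cleaned_responses.append(cleaned_item)
--         else:
--             invalid_count += 1
--             cleaned_responses.append(["invalid"] * len(item))
--     return cleaned_responses, invalid_count
-- ===== SOURCE B (Python) =====
-- def _clean_row(item):
--     return ["".join(ch.lower() for ch in s if ch.isalnum()) for s in item]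
--
--
-- def _row_valid(row):
--     return (all(row)
--             and all(c in ("a", "b") for c in row[:2])
--             and all(c.startswith(("yes", "no")) for c in row[4:6]))
--
--
-- def clean_responses(data):
--     """Staged whole-dataset passes: clean everything, flag each row, then assemble."""
--     cleaned = [_clean_row(item) for item in data]
--     flags = [_row_valid(row) for row in cleaned]
--     out = [row if ok else ["invalid"] * len(item)
--            for item, row, ok in zip(data, cleaned, flags)]
--     return out, flags.count(False)
-- ===== Notes on version B (the rewrite author's own statement) =====
-- stated objective: alternative
-- what changed: A is one interleaved per-row loop that cleans and validates each string with an if/elif chain and a break; B makes three whole-dataset passes - clean every row, compute a validity flag per cleaned row via slice-based rules (row[:2] in {a,b}, row[4:6] starts with yes/no, all nonempty), then zip the passes together and count False flags.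
import Mathlib
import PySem

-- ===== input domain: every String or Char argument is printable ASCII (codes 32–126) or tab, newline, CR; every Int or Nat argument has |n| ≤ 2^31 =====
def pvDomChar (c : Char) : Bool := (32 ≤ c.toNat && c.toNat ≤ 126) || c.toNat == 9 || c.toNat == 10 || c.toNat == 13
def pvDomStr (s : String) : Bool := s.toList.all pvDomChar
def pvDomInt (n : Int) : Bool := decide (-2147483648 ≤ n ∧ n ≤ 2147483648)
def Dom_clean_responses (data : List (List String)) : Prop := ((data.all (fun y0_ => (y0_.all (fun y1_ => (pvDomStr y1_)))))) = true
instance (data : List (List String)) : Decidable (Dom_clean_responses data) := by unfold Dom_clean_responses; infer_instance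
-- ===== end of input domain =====

-- B replaces A's single interleaved clean-and-validate-with-break loop by three staged
-- whole-dataset passes (clean all, flag each row via slice-based rules, assemble by zip)
-- (objective: alternative decomposition, same cost).

set_option maxHeartbeats 1000000

-- ===== PORT A =====
-- "".join(e.lower() for e in string if e.isalnum())
def cleanStrA (s : String) : String :=
  String.mk ((s.toList.filter PySem.Chars.isalnum).map PySem.Chars.lowerChar)

-- the inner `for i, string in enumerate(item)` loop with its break: none = valid was set False
def cleanLoopA : Int → List String → List String → Option (List String)
  | _, acc, [] => some acc
  | i, acc, s :: rest =>
    let cleaned := cleanStrA s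
    if cleaned == "" then none
    else if i == 0 || i == 1 then
      if !(cleaned == "a" || cleaned == "b") then none
      else cleanLoopA (i + 1) (acc ++ [cleaned]) rest
    else if i == 2 || i == 3 then
      if PySem.Str.len cleaned == 0 then none
      else cleanLoopA (i + 1) (acc ++ [cleaned]) rest
    else if i == 4 || i == 5 then
      if !(PySem.Str.startswith cleaned "yes" || PySem.Str.startswith cleaned "no") then none
      else cleanLoopA (i + 1) (acc ++ [cleaned]) rest
    else cleanLoopA (i + 1) (acc ++ [cleaned]) rest

def clean_responses (data : List (List String)) : List (List String) × Int :=
  data.foldl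
    (fun st item =>
      match cleanLoopA 0 [] item with
      | some cleaned_item => (st.1 ++ [cleaned_item], st.2)
      | none => (st.1 ++ [List.replicate item.length "invalid"], st.2 + 1))
    ([], 0)

-- ===== PORT B =====
-- _clean_row
def cleanStrB (s : String) : String :=
  String.mk ((s.toList.filter PySem.Chars.isalnum).map PySem.Chars.lowerChar)

def cleanRowB (item : List String) : List String := item.map cleanStrB

-- _row_valid: all(row) and row[:2] all in {'a','b'} and row[4:6] all start with yes/no
def rowValidB (row : List String) : Bool :=
  row.all (fun c => !(c == "")) &&
  (PySem.List.slice row none (some 2)).all (fun c => c == "a" || c == "b") &&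
  (PySem.List.slice row (some 4) (some 6)).all
    (fun c => PySem.Str.startswith c "yes" || PySem.Str.startswith c "no")

def clean_responses_alt (data : List (List String)) : List (List String) × Int :=
  let cleaned := data.map cleanRowB
  let flags := cleaned.map rowValidB
  let out := (data.zip (cleaned.zip flags)).map
    (fun p => if p.2.2 then p.2.1 else List.replicate p.1.length "invalid")
  (out, (flags.count false : Nat))

-- ===== PRECONDITION & SPEC =====
def Spec_clean_responses (data : List (List String)) (out : List (List String) × Int) : Prop := out = clean_responses_alt data
instance (data : List (List String)) (out : List (List String) × Int) : Decidable (Spec_clean_responses data out) := by unfold Spec_clean_responses; infer_instance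

-- ===== CLAIM (what is proved, stated in full; the proofs are below) =====
def Claim_equal_clean_responses : Prop := ∀ (data : List (List String)), Dom_clean_responses data → Spec_clean_responses data (clean_responses data)

-- ===== LEMMAS AND PROOFS =====

-- A's per-index check, written as a single boolean predicate on the cleaned string
def okA (i : Int) (c : String) : Bool :=
  !(c == "") &&
  (if i == 0 || i == 1 then c == "a" || c == "b"
   else if i == 4 || i == 5 then PySem.Str.startswith c "yes" || PySem.Str.startswith c "no"
   else true)

-- A's remaining validity check from index i on
def validAux : Int → List String → Bool
  | _, [] => true
  | i, c :: rest => okA i c && validAux (i + 1) rest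

lemma cleanStr_ne_empty_len {c : String} (h : ¬ c = "") : ¬ PySem.Str.len c = 0 := by
  intro hlen
  apply h
  have : c.toList.length = 0 := by simpa [PySem.Str.len] using hlen
  exact String.toList_eq_nil_iff.mp (List.length_eq_zero_iff.mp this)

-- A's loop body on one string is exactly okA on the cleaned string
lemma cleanLoopA_cons (i : Int) (acc : List String) (s : String) (rest : List String) :
    cleanLoopA i acc (s :: rest) =
      if okA i (cleanStrA s) then cleanLoopA (i + 1) (acc ++ [cleanStrA s]) rest else none := by
  show (if cleanStrA s == "" then none
    else if i == 0 || i == 1 then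
      if !(cleanStrA s == "a" || cleanStrA s == "b") then none
      else cleanLoopA (i + 1) (acc ++ [cleanStrA s]) rest
    else if i == 2 || i == 3 then
      if PySem.Str.len (cleanStrA s) == 0 then none
      else cleanLoopA (i + 1) (acc ++ [cleanStrA s]) rest
    else if i == 4 || i == 5 then
      if !(PySem.Str.startswith (cleanStrA s) "yes" || PySem.Str.startswith (cleanStrA s) "no") then none
      else cleanLoopA (i + 1) (acc ++ [cleanStrA s]) rest
    else cleanLoopA (i + 1) (acc ++ [cleanStrA s]) rest) = _
  generalize cleanStrA s = c
  by_cases hc : c = ""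
  · simp [okA, hc]
  · have hlen := cleanStr_ne_empty_len hc
    simp only [okA]
    split_ifs with h1 h2 h3 h4 h5 <;> simp_all <;> first | tauto | omega

-- A's whole inner loop = clean everything, then validAux on the cleaned list
lemma cleanLoopA_eq (l : List String) (i : Int) (acc : List String) :
    cleanLoopA i acc l =
      if validAux i (l.map cleanStrB) then some (acc ++ l.map cleanStrB) else none := by
  induction l generalizing i acc with
  | nil => simp [cleanLoopA, validAux]
  | cons s rest ih =>
    have hAB : cleanStrA s = cleanStrB s := rfl
    rw [cleanLoopA_cons, hAB]
    show _ = if okA i (cleanStrB s) && validAux (i + 1) (rest.map cleanStrB) then _ else _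
    cases hok : okA i (cleanStrB s) with
    | true => rw [if_pos rfl, ih]; simp [List.append_assoc]
    | false => simp

-- from index 6 on, validAux only checks nonemptiness
lemma validAux_ge_six (l : List String) (i : Int) (h6 : 6 ≤ i) :
    validAux i l = l.all (fun c => !(c == "")) := by
  induction l generalizing i with
  | nil => simp [validAux]
  | cons c rest ih =>
    have h0 : (i == 0 || i == 1) = false := by simp; omega
    have h4 : (i == 4 || i == 5) = false := by simp; omega
    simp [validAux, okA, h0, h4, ih (i + 1) (by omega)]

-- validAux from 0 = B's slice-based row validity
lemma validAux_eq_rowValid (row : List String) : validAux 0 row = rowValidB row := by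
  have hs2 : ∀ (r : List String), PySem.List.slice r none (some 2) = r.take 2 := fun r => by
    simpa using PySem.List.slice_to_natCast (xs := r) (b := 2)
  have hs46 : ∀ (r : List String),
      PySem.List.slice r (some 4) (some 6) = (r.drop 4).take 2 := fun r => by
    simpa using PySem.List.slice_natCast (xs := r) (a := 4) (b := 6)
  match row with
  | [] =>
    simp only [validAux, rowValidB, hs2, hs46]
    simp
  | [c0] =>
    simp [validAux, okA, rowValidB, hs2, hs46]
    all_goals
      rw [Bool.eq_iff_iff]
      simp only [Bool.and_eq_true, Bool.or_eq_true, Bool.not_eq_true']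
      tauto
  | [c0, c1] =>
    simp [validAux, okA, rowValidB, hs2, hs46]
    all_goals
      rw [Bool.eq_iff_iff]
      simp only [Bool.and_eq_true, Bool.or_eq_true, Bool.not_eq_true']
      tauto
  | [c0, c1, c2] =>
    simp [validAux, okA, rowValidB, hs2, hs46]
    all_goals
      rw [Bool.eq_iff_iff]
      simp only [Bool.and_eq_true, Bool.or_eq_true, Bool.not_eq_true']
      tauto
  | [c0, c1, c2, c3] =>
    simp [validAux, okA, rowValidB, hs2, hs46]
    all_goals
      rw [Bool.eq_iff_iff]
      simp only [Bool.and_eq_true, Bool.or_eq_true, Bool.not_eq_true']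
      tauto
  | [c0, c1, c2, c3, c4] =>
    simp [validAux, okA, rowValidB, hs2, hs46]
    all_goals
      rw [Bool.eq_iff_iff]
      simp only [Bool.and_eq_true, Bool.or_eq_true, Bool.not_eq_true']
      tauto
  | [c0, c1, c2, c3, c4, c5] =>
    simp [validAux, okA, rowValidB, hs2, hs46]
    all_goals
      rw [Bool.eq_iff_iff]
      simp only [Bool.and_eq_true, Bool.or_eq_true, Bool.not_eq_true']
      tauto
  | c0 :: c1 :: c2 :: c3 :: c4 :: c5 :: rest =>
    have h6 := validAux_ge_six rest 6 (by omega)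
    simp [validAux, okA, rowValidB, hs2, hs46, h6]
    all_goals
      rw [Bool.eq_iff_iff]
      simp only [Bool.and_eq_true, Bool.or_eq_true, Bool.not_eq_true']
      tauto

-- the per-item output row of both versions
def outRow (item : List String) : List String :=
  if rowValidB (cleanRowB item) then cleanRowB item else List.replicate item.length "invalid"

-- B's zip-of-maps assembly is a single map of outRow
lemma alt_out_eq (data : List (List String)) :
    (data.zip ((data.map cleanRowB).zip (data.map (fun it => rowValidB (cleanRowB it))))).map
      (fun p => if p.2.2 then p.2.1 else List.replicate p.1.length "invalid")
    = data.map outRow := by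
  induction data with
  | nil => rfl
  | cons item rest ih => simp [outRow, ih]

-- B's flag count = count of invalid rows
lemma alt_count_eq (data : List (List String)) :
    (data.map (fun it => rowValidB (cleanRowB it))).count false
      = (data.filter (fun item => !rowValidB (cleanRowB item))).length := by
  induction data with
  | nil => rfl
  | cons item rest ih =>
    cases h : rowValidB (cleanRowB item) <;>
      simp [List.count_cons, h, ih]

-- B unfolded: the three passes compute map outRow and the invalid count
lemma alt_eq (data : List (List String)) :
    clean_responses_alt data =
      (data.map outRow,
       ((data.filter (fun item => !rowValidB (cleanRowB item))).length : Int)) := by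
  unfold clean_responses_alt
  simp only [List.map_map, Function.comp_def]
  rw [alt_out_eq, alt_count_eq]

-- A's fold, with general accumulator
lemma foldA_eq (data : List (List String)) (acc : List (List String)) (n : Int) :
    data.foldl
      (fun st item =>
        match cleanLoopA 0 [] item with
        | some cleaned_item => (st.1 ++ [cleaned_item], st.2)
        | none => (st.1 ++ [List.replicate item.length "invalid"], st.2 + 1))
      (acc, n)
    = (acc ++ data.map outRow,
       n + (data.filter (fun item => !rowValidB (cleanRowB item))).length) := by
  induction data generalizing acc n with
  | nil => simp
  | cons item rest ih =>
    have h0 := cleanLoopA_eq item 0 []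
    rw [validAux_eq_rowValid] at h0
    have h : cleanLoopA 0 [] item =
        if rowValidB (cleanRowB item) then some (cleanRowB item) else none := by
      rw [h0]; simp [cleanRowB]
    show List.foldl _ (match cleanLoopA 0 [] item with
        | some cleaned_item => (acc ++ [cleaned_item], n)
        | none => (acc ++ [List.replicate item.length "invalid"], n + 1)) rest = _
    cases hv : rowValidB (cleanRowB item) with
    | true =>
      rw [h, if_pos hv]
      show List.foldl _ (acc ++ [cleanRowB item], n) rest = _
      rw [ih]
      have ho : outRow item = cleanRowB item := by simp [outRow, hv]
      simp [ho, hv, List.filter_cons]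
    | false =>
      rw [h, if_neg (by simp [hv])]
      show List.foldl _ (acc ++ [List.replicate item.length "invalid"], n + 1) rest = _
      rw [ih]
      have ho : outRow item = List.replicate item.length "invalid" := by simp [outRow, hv]
      simp [ho, hv, List.filter_cons]
      omega

-- ===== VERDICT (by name: the statement is the Claim_ definition above) =====
theorem clean_responses_spec : Claim_equal_clean_responses := by
  intro data _
  show clean_responses data = clean_responses_alt data
  unfold clean_responses
  rw [foldA_eq, alt_eq]
  simp
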